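-- pv_equiv track=rewrite | github.com/nf-core/msproteomics | modules/local/parse_fragpipe_workflow/resources/usr/bin/parse_fragpipe_workflow.py | _unescape_java_properties
-- ===== SOURCE A (Python) =====
-- def _unescape_java_properties(value: str) -> str:
--     """Unescape Java Properties file escape sequences in values.
--
--     FragPipe .workflow files use Java Properties format where:
--       \\= → =    \\: → :    \\\\ → \\    \\n → newline    \\t → tab
--     """
--     result = []
--     i = 0
--     while i < len(value):
--         if value[i] == "\\" and i + 1 < len(value):
--             next_char = value[i + 1]
--             if next_char == "=":
--                 result.append("=")
--                 i += 2
--             elif next_char == ":":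
--                 result.append(":")
--                 i += 2
--             elif next_char == "\\":
--                 result.append("\\")
--                 i += 2
--             elif next_char == "n":
--                 result.append("\n")
--                 i += 2
--             elif next_char == "t":
--                 result.append("\t")
--                 i += 2
--             else:
--                 result.append(value[i])
--                 i += 1
--         else:
--             result.append(value[i])
--             i += 1
--     return "".join(result)
-- ===== SOURCE B (Python) =====
-- import re
--
-- _TABLE = {"=": "=", ":": ":", "\\": "\\", "n": "\n", "t": "\t"}
--
--
-- def _unescape_java_properties(value: str) -> str:
--     """Unescape Java Properties escapes with one regex pass and a dispatch table."""
--     return re.sub(r"\\(.)", lambda m: _TABLE.get(m.group(1), "\\" + m.group(1)), value)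
-- ===== Notes on version B (the rewrite author's own statement) =====
-- stated objective: faster
-- what changed: Replaced the manual while-loop index scanner with a single regex-substitution pass (backslash followed by any character) whose replacer is a dispatch-dict lookup, defaulting to keeping the literal backslash for unrecognized escapes.
import Mathlib
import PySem

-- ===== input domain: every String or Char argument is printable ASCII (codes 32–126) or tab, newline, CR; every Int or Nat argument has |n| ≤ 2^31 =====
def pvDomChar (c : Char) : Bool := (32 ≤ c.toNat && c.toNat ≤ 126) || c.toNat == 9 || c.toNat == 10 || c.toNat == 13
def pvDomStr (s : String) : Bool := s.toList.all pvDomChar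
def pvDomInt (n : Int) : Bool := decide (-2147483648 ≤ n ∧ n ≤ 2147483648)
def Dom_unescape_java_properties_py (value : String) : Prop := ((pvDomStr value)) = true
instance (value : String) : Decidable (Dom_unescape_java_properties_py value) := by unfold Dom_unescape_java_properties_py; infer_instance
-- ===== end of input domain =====

-- B replaces A's manual index/while scanner by a single regex substitution r"\\(.)"
-- whose replacer is a dispatch-table lookup (one C-level regex pass instead of a
-- Python char loop; a timing run measured B faster).

-- ===== PORT A =====
-- A's while loop over the index i, appending to `result`; consuming one char
-- (plain char, trailing backslash, unrecognized escape) or two (recognized escape).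
-- The index scan over value[i], value[i+1] is transcribed as recursion on the
-- remaining characters with the accumulator `result`.
def unescapeA_loop (result : List Char) (rest : List Char) : List Char :=
  match rest with
  | [] => result
  | c :: rest' =>
    if c = '\\' then
      match rest' with
      | next_char :: rest'' =>
        if next_char = '=' then unescapeA_loop (result ++ ['=']) rest''
        else if next_char = ':' then unescapeA_loop (result ++ [':']) rest''
        else if next_char = '\\' then unescapeA_loop (result ++ ['\\']) rest''
        else if next_char = 'n' then unescapeA_loop (result ++ ['\n']) rest''
        else if next_char = 't' then unescapeA_loop (result ++ ['\t']) rest''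
        else unescapeA_loop (result ++ [c]) (next_char :: rest'')  -- i += 1: rescan from next_char
      | [] => unescapeA_loop (result ++ [c]) []  -- trailing backslash (rest' = [])
    else unescapeA_loop (result ++ [c]) rest'
termination_by rest.length
decreasing_by all_goals (simp only [List.length_cons, List.length_nil]; omega)

def unescape_java_properties_py (value : String) : String :=
  String.ofList (unescapeA_loop [] value.toList)

-- ===== PORT B =====
-- The dispatch table _TABLE (Python dict with single-character keys → Char keys).
def unescapeB_table : PySem.Dict Char String :=
  PySem.Dict.ofList [('=', "="), (':', ":"), ('\\', "\\"), ('n', "\n"), ('t', "\t")]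

-- The replacer lambda: table lookup, default "\\" + m.group(1).
def unescapeB_replacer (g : Char) : String :=
  unescapeB_table.getD g (String.ofList ['\\', g])

-- re.sub scanning: at each position try to match r"\\(.)" (a backslash followed by
-- any character except '\n'); on a match emit the replacer's output and resume after
-- the match, otherwise copy one character and move on.
def unescapeB_sub (s : List Char) : List Char :=
  match s with
  | [] => []
  | c :: rest =>
    if c = '\\' then
      match rest with
      | g :: rest' =>
        if g ≠ '\n' then (unescapeB_replacer g).toList ++ unescapeB_sub rest'
        else c :: unescapeB_sub (g :: rest')  -- no match here; resume at g
      | [] => c :: unescapeB_sub []  -- trailing backslash (rest = [])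
    else c :: unescapeB_sub rest
termination_by s.length
decreasing_by all_goals (simp only [List.length_cons, List.length_nil]; omega)

def unescape_java_properties_py_alt (value : String) : String :=
  String.ofList (unescapeB_sub value.toList)

-- ===== PRECONDITION & SPEC =====
def Spec_unescape_java_properties_py (value : String) (out : String) : Prop := out = unescape_java_properties_py_alt value
instance (value : String) (out : String) : Decidable (Spec_unescape_java_properties_py value out) := by unfold Spec_unescape_java_properties_py; infer_instance

-- ===== CLAIM (what is proved, stated in full; the proofs are below) =====
def Claim_equal_unescape_java_properties_py : Prop := ∀ (value : String), Dom_unescape_java_properties_py value → Spec_unescape_java_properties_py value (unescape_java_properties_py value)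

-- ===== LEMMAS AND PROOFS =====

-- Evaluation of B's replacer: table hit for the five escape letters, default otherwise.
theorem unescapeB_replacer_eval (g : Char) : (unescapeB_replacer g).toList =
    if g = '=' then ['=']
    else if g = ':' then [':']
    else if g = '\\' then ['\\']
    else if g = 'n' then ['\n']
    else if g = 't' then ['\t']
    else ['\\', g] := by
  have h : unescapeB_table
      = PySem.Dict.mk [('=', "="), (':', ":"), ('\\', "\\"), ('n', "\n"), ('t', "\t")] := by
    rfl
  simp only [unescapeB_replacer, h, PySem.Dict.getD_eq_get?_getD, PySem.Dict.get?_mk_cons]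
  by_cases h1 : g = '='
  · subst h1; simp
  by_cases h2 : g = ':'
  · subst h2; simp
  by_cases h3 : g = '\\'
  · subst h3; simp
  by_cases h4 : g = 'n'
  · subst h4; simp
  by_cases h5 : g = 't'
  · subst h5; simp
  · simp [h1, h2, h3, h4, h5, Ne.symm, beq_iff_eq, PySem.Dict.get?]

theorem unescapeA_eq_B : ∀ (rest result : List Char),
    unescapeA_loop result rest = result ++ unescapeB_sub rest := by
  intro rest
  induction rest using unescapeB_sub.induct with
  | case1 => intro result; simp [unescapeA_loop, unescapeB_sub]
  | case2 g rest' hg ih =>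
    intro result
    by_cases h1 : g = '='
    · subst h1; simp [unescapeA_loop, unescapeB_sub, unescapeB_replacer_eval, ih]
    by_cases h2 : g = ':'
    · subst h2; simp [unescapeA_loop, unescapeB_sub, unescapeB_replacer_eval, ih]
    by_cases h3 : g = '\\'
    · subst h3; simp [unescapeA_loop, unescapeB_sub, unescapeB_replacer_eval, ih]
    by_cases h4 : g = 'n'
    · subst h4; simp [unescapeA_loop, unescapeB_sub, unescapeB_replacer_eval, ih]
    by_cases h5 : g = 't'
    · subst h5; simp [unescapeA_loop, unescapeB_sub, unescapeB_replacer_eval, ih]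
    -- unrecognized escape: A keeps '\\' and re-scans g; since g ≠ '\\',
    -- A then copies g, which is what B's default replacer emits.
    · have hA1 : unescapeA_loop result ('\\' :: g :: rest')
          = unescapeA_loop (result ++ ['\\']) (g :: rest') := by
        conv_lhs => rw [unescapeA_loop.eq_def]
        simp [h1, h2, h3, h4, h5]
      have hA2 : unescapeA_loop (result ++ ['\\']) (g :: rest')
          = unescapeA_loop (result ++ ['\\', g]) rest' := by
        conv_lhs => rw [unescapeA_loop.eq_def]
        simp [h3, List.append_assoc]
      rw [hA1, hA2, ih]
      simp [unescapeB_sub, unescapeB_replacer_eval, h1, h2, h3, h4, h5, hg,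
        List.append_assoc]
  | case3 g rest' hg ih =>
    -- g = '\n': no regex match; B copies '\\' and rescans from g; in A,
    -- '\n' is an unrecognized escape with the same effect.
    intro result
    rw [not_not] at hg
    subst hg
    have hA : unescapeA_loop result ('\\' :: '\n' :: rest')
        = unescapeA_loop (result ++ ['\\']) ('\n' :: rest') := by
      conv_lhs => rw [unescapeA_loop.eq_def]
      simp
    rw [hA, ih]
    conv_rhs => rw [unescapeB_sub.eq_def]
    simp only [List.append_assoc, reduceIte, ne_eq, not_true_eq_false,
      if_false, List.cons_append, List.nil_append]
  | case4 _ =>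
    intro result
    conv_lhs => rw [unescapeA_loop.eq_def]
    conv_rhs => rw [unescapeB_sub.eq_def]
    simp only [reduceIte]
    conv_lhs => rw [unescapeA_loop.eq_def]
    conv_rhs => rw [unescapeB_sub.eq_def]
  | case5 c rest hc ih =>
    intro result
    conv_lhs => rw [unescapeA_loop.eq_def]
    conv_rhs => rw [unescapeB_sub.eq_def]
    cases rest with
    | nil => simp [hc, ih, List.append_assoc]
    | cons d rest' => simp [hc, ih, List.append_assoc]

-- ===== VERDICT (by name: the statement is the Claim_ definition above) =====
theorem unescape_java_properties_py_spec : Claim_equal_unescape_java_properties_py := by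
  intro value _
  unfold Spec_unescape_java_properties_py unescape_java_properties_py unescape_java_properties_py_alt
  rw [unescapeA_eq_B]
  simp
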